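-- pv_equiv track=rewrite | github.com/MrEdgariux/PrisonXD | classes/chat/commands/command_handler.py | _split_argv
-- ===== SOURCE A (Python) =====
-- from typing import Callable, Dict, List, Any
--
-- def _split_argv(s: str) -> List[str]:
--     # minimal argv splitter that respects "quoted strings"
--     out, buf, in_quotes = [], "", False
--     for ch in s.strip():
--         if ch == '"' and not in_quotes:
--             in_quotes = True
--         elif ch == '"' and in_quotes:
--             in_quotes = False
--         elif ch.isspace() and not in_quotes:
--             if buf:
--                 out.append(buf); buf = ""
--         else:
--             buf += ch
--     if buf:
--         out.append(buf)
--     return out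
-- ===== SOURCE B (Python) =====
-- from typing import List
--
-- def _split_argv(s: str) -> List[str]:
--     # split on '"': even-indexed segments are outside quotes, odd-indexed inside
--     out: List[str] = []
--     buf = ""
--     for i, seg in enumerate(s.strip().split('"')):
--         if i % 2:
--             buf += seg
--         else:
--             for ch in seg:
--                 if ch.isspace():
--                     if buf:
--                         out.append(buf)
--                         buf = ""
--                 else:
--                     buf += ch
--     if buf:
--         out.append(buf)
--     return out
-- ===== Notes on version B (the rewrite author's own statement) =====
-- stated objective: alternative
-- what changed: B drops A's per-character in_quotes state machine: it splits the stripped string on the double-quote character and folds over the segments by index parity, word-splitting even (outside-quote) segments and gluing odd (inside-quote) segments whole into the buffer.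
import Mathlib
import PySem

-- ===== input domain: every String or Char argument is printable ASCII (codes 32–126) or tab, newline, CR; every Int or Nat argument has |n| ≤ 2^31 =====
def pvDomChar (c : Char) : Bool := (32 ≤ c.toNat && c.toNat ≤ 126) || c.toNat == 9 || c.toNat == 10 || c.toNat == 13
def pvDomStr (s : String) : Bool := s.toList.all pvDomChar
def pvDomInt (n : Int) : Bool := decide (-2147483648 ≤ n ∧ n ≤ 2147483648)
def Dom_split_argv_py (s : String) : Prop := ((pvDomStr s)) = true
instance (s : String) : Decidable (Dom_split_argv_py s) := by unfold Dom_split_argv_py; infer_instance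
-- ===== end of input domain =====

-- B replaces A's in_quotes flag by splitting on '"' and treating segments by index parity (alternative decomposition, same cost).

-- ===== PORT A =====
-- loop body of A: the four branches on ch, state (out, buf, in_quotes)
def pvStepA (st : List (List Char) × List Char × Bool) (ch : Char) :
    List (List Char) × List Char × Bool :=
  if ch == '"' && !st.2.2 then (st.1, st.2.1, true)
  else if ch == '"' && st.2.2 then (st.1, st.2.1, false)
  else if PySem.Chars.isspace ch && !st.2.2 then
    (if st.2.1 ≠ [] then (st.1 ++ [st.2.1], [], st.2.2) else st)
  else (st.1, st.2.1 ++ [ch], st.2.2)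

def split_argv_py (s : String) : List String :=
  let r := (PySem.Str.strip s).toList.foldl pvStepA ([], [], false)
  (if r.2.1 ≠ [] then r.1 ++ [r.2.1] else r.1).map String.ofList

-- ===== PORT B =====
-- inner loop of B over an even (outside-quote) segment, state (out, buf)
def pvEvenStep (st : List (List Char) × List Char) (ch : Char) :
    List (List Char) × List Char :=
  if PySem.Chars.isspace ch then (if st.2 ≠ [] then (st.1 ++ [st.2], []) else st)
  else (st.1, st.2 ++ [ch])

-- body of B's outer loop over enumerate(segments): odd index glues, even index word-splits
def pvSegStep (st : List (List Char) × List Char) (p : Int × List Char) :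
    List (List Char) × List Char :=
  if PySem.Int.mod p.1 2 ≠ 0 then (st.1, st.2 ++ p.2)
  else p.2.foldl pvEvenStep st

def split_argv_py_alt (s : String) : List String :=
  let segs := PySem.Chars.splitOn (PySem.Str.strip s).toList ['"']
  let r := (PySem.List.enumerate segs 0).foldl pvSegStep ([], [])
  (if r.2 ≠ [] then r.1 ++ [r.2] else r.1).map String.ofList

-- ===== PRECONDITION & SPEC =====
def Spec_split_argv_py (s : String) (out : List String) : Prop := out = split_argv_py_alt s
instance (s : String) (out : List String) : Decidable (Spec_split_argv_py s out) := by unfold Spec_split_argv_py; infer_instance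

-- ===== CLAIM (what is proved, stated in full; the proofs are below) =====
def Claim_equal_split_argv_py : Prop := ∀ (s : String), Dom_split_argv_py s → Spec_split_argv_py s (split_argv_py s)

-- ===== LEMMAS AND PROOFS =====

-- structural form of str.split('"') (accumulator = current piece, reversed)
def pvSplitAux : List Char → List Char → List (List Char)
  | [], cur => [cur.reverse]
  | c :: rest, cur =>
      if c = '"' then cur.reverse :: pvSplitAux rest []
      else pvSplitAux rest (c :: cur)

theorem pvGo_eq (fuel : Nat) :
    ∀ (l cur : List Char) (accs : List (List Char)), l.length < fuel →
      PySem.Chars.splitOn.go ['"'] fuel l cur accs = accs.reverse ++ pvSplitAux l cur := by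
  induction fuel with
  | zero => intro l cur accs h; omega
  | succ n ih =>
    intro l cur accs h
    cases l with
    | nil => simp [PySem.Chars.splitOn.go, pvSplitAux]
    | cons c rest =>
      simp only [PySem.Chars.splitOn.go]
      simp only [List.length_cons] at h
      by_cases hc : c = '"'
      · subst hc
        have hp : List.isPrefixOf ['"'] ('"' :: rest) = true := by
          simp [List.isPrefixOf]
        rw [if_pos hp]
        rw [show List.drop (['"'] : List Char).length ('"' :: rest) = rest from rfl]
        rw [ih rest [] (cur.reverse :: accs) (by omega)]
        simp [pvSplitAux]
      · have hp : List.isPrefixOf ['"'] (c :: rest) = false := by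
          simp [List.isPrefixOf]
          exact fun h => hc h.symm
        rw [if_neg (by simp [hp])]
        rw [ih rest (c :: cur) accs (by omega)]
        simp [pvSplitAux, hc]

theorem pvSplitOn_eq (l : List Char) :
    PySem.Chars.splitOn l ['"'] = pvSplitAux l [] := by
  unfold PySem.Chars.splitOn
  simpa using pvGo_eq (l.length + 1) l [] [] (by omega)

-- head/tail of pvSplitAux with a nonempty accumulator
theorem pvSplitAux_acc (l : List Char) :
    ∀ cur : List Char, ∃ hd tl, pvSplitAux l [] = hd :: tl ∧
      pvSplitAux l cur = (cur.reverse ++ hd) :: tl := by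
  induction l with
  | nil => intro cur; exact ⟨[], [], by simp [pvSplitAux], by simp [pvSplitAux]⟩
  | cons c rest ih =>
    intro cur
    by_cases hc : c = '"'
    · exact ⟨[], pvSplitAux rest [], by simp [pvSplitAux, hc], by simp [pvSplitAux, hc]⟩
    · obtain ⟨hd, tl, h1, h2⟩ := ih [c]
      obtain ⟨hd', tl', h1', h2'⟩ := ih (c :: cur)
      rw [h1] at h1'
      injection h1' with hh ht
      subst hh; subst ht
      refine ⟨c :: hd, tl, ?_, ?_⟩
      · simpa [pvSplitAux, hc] using h2
      · rw [show pvSplitAux (c :: rest) cur = pvSplitAux rest (c :: cur) by simp [pvSplitAux, hc]]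
        rw [h2']
        simp

-- proof-side two-mode recursion over the segment list
def pvProc : Bool → List (List Char) → List (List Char) × List Char → List (List Char) × List Char
  | _, [], st => st
  | false, seg :: rest, st => pvProc true rest (seg.foldl pvEvenStep st)
  | true, seg :: rest, st => pvProc false rest (st.1, st.2 ++ seg)

-- B's enumerate fold is pvProc, with the mode = parity of the start index
theorem pvEnum_eq (segs : List (List Char)) :
    ∀ (n : Nat) (st : List (List Char) × List Char),
      (PySem.List.enumerate segs (n : Int)).foldl pvSegStep st
        = pvProc (decide (n % 2 = 1)) segs st := by
  induction segs with
  | nil => intro n st; simp [PySem.List.enumerate_nil, pvProc]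
  | cons seg rest ih =>
    intro n st
    rw [PySem.List.enumerate_cons]
    have hcast : ((n : Int) + 1) = ((n + 1 : Nat) : Int) := by push_cast; ring
    have hmod : PySem.Int.mod (n : Int) 2 = (n : Int) % 2 :=
      PySem.Int.mod_eq_emod_of_pos (by omega)
    by_cases hpar : n % 2 = 1
    · have hne : PySem.Int.mod (n : Int) 2 ≠ 0 := by rw [hmod]; omega
      simp only [List.foldl_cons, pvSegStep, if_pos hne, hcast, ih]
      have h2 : ¬ (n + 1) % 2 = 1 := by omega
      simp [hpar, h2, pvProc]
    · have hne : ¬ PySem.Int.mod (n : Int) 2 ≠ 0 := by rw [hmod]; omega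
      simp only [List.foldl_cons, pvSegStep, if_neg hne, hcast, ih]
      have h2 : (n + 1) % 2 = 1 := by omega
      simp [hpar, h2, pvProc]

-- A's step at in_quotes=false on a non-quote char is B's pvEvenStep
theorem pvStepA_false (out : List (List Char)) (buf : List Char) (c : Char) (hc : c ≠ '"') :
    pvStepA (out, buf, false) c = ((pvEvenStep (out, buf) c).1, (pvEvenStep (out, buf) c).2, false) := by
  by_cases hsp : PySem.Chars.isspace c
  · by_cases hb : buf ≠ [] <;> simp [pvStepA, pvEvenStep, hc, hsp, hb]
  · simp [pvStepA, pvEvenStep, hc, hsp]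

-- A's step at in_quotes=true on a non-quote char appends it to buf
theorem pvStepA_true (out : List (List Char)) (buf : List Char) (c : Char) (hc : c ≠ '"') :
    pvStepA (out, buf, true) c = (out, buf ++ [c], true) := by
  by_cases hsp : PySem.Chars.isspace c <;> simp [pvStepA, hc, hsp]

-- the heart: A's flag-fold equals pvProc over the '"'-segments, in both modes
theorem pvMain (cs : List Char) :
    ∀ (out : List (List Char)) (buf : List Char),
      (((cs.foldl pvStepA (out, buf, false)).1, (cs.foldl pvStepA (out, buf, false)).2.1)
          = pvProc false (pvSplitAux cs []) (out, buf))
      ∧ (((cs.foldl pvStepA (out, buf, true)).1, (cs.foldl pvStepA (out, buf, true)).2.1)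
          = pvProc true (pvSplitAux cs []) (out, buf)) := by
  induction cs with
  | nil => intro out buf; simp [pvSplitAux, pvProc]
  | cons c rest ih =>
    intro out buf
    by_cases hc : c = '"'
    · subst hc
      constructor
      · simp only [List.foldl_cons, pvStepA, pvSplitAux]
        simpa [pvProc] using (ih out buf).2
      · simp only [List.foldl_cons, pvStepA, pvSplitAux]
        simpa [pvProc] using (ih out buf).1
    · obtain ⟨hd, tl, h1, h2⟩ := pvSplitAux_acc rest [c]
      have hsplit : pvSplitAux (c :: rest) [] = (c :: hd) :: tl := by
        simpa [pvSplitAux, hc] using h2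
      constructor
      · rw [List.foldl_cons, pvStepA_false out buf c hc, hsplit]
        simp only [pvProc, List.foldl_cons]
        have := (ih (pvEvenStep (out, buf) c).1 (pvEvenStep (out, buf) c).2).1
        rw [h1] at this
        simp only [pvProc] at this
        simpa using this
      · rw [List.foldl_cons, pvStepA_true out buf c hc, hsplit]
        simp only [pvProc]
        have := (ih out (buf ++ [c])).2
        rw [h1] at this
        simp only [pvProc] at this
        simpa [List.append_assoc] using this

-- the whole pipeline, on the char-list level
theorem pvFinal (cs : List Char) :
    (let r := cs.foldl pvStepA ([], [], false)
     (if r.2.1 ≠ [] then r.1 ++ [r.2.1] else r.1))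
      = (let r := (PySem.List.enumerate (PySem.Chars.splitOn cs ['"']) 0).foldl pvSegStep ([], [])
         (if r.2 ≠ [] then r.1 ++ [r.2] else r.1)) := by
  simp only [pvSplitOn_eq]
  have he := pvEnum_eq (pvSplitAux cs []) 0 ([], [])
  norm_num at he
  rw [he]
  have hm := (pvMain cs [] []).1
  rw [show (cs.foldl pvStepA ([], [], false)).2.1
        = (pvProc false (pvSplitAux cs []) ([], [])).2 from congrArg Prod.snd hm,
      show (cs.foldl pvStepA ([], [], false)).1
        = (pvProc false (pvSplitAux cs []) ([], [])).1 from congrArg Prod.fst hm]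

-- ===== VERDICT (by name: the statement is the Claim_ definition above) =====
theorem split_argv_py_spec : Claim_equal_split_argv_py := by
  intro s _
  unfold Spec_split_argv_py split_argv_py split_argv_py_alt
  exact congrArg (List.map String.ofList) (pvFinal (PySem.Str.strip s).toList)
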